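-- pv_equiv track=rewrite | github.com/skihyeon/TFLOP | src/models/otsl_tokenizer.py | validate_otsl_sequence
-- ===== SOURCE A (Python) =====
-- def validate_otsl_sequence(sequence: str) -> bool:
--     """OTSL 시퀀스 유효성 검사"""
--     tokens = sequence.split()
--     if not tokens:
--         return False
--
--     # 각 행이 최소 하나의 셀을 포함하는지 확인
--     current_row = []
--     for token in tokens:
--         if token == 'NL':
--             if not current_row:  # 빈 행 체크
--                 return False
--             current_row = []
--         else:
--             current_row.append(token)
--
--     # 마지막 행 체크
--     if not current_row:
--         return False
--
--     return True
-- ===== SOURCE B (Python) =====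
-- def validate_otsl_sequence(sequence: str) -> bool:
--     tokens = sequence.split()
--     if not tokens:
--         return False
--     if tokens[0] == 'NL' or tokens[-1] == 'NL':
--         return False
--     for a, b in zip(tokens, tokens[1:]):
--         if a == 'NL' and b == 'NL':
--             return False
--     return True
-- ===== Notes on version B (the rewrite author's own statement) =====
-- stated objective: simpler
-- what changed: Instead of accumulating a current_row list and checking it at each NL and at the end, B checks local conditions on the token list: no leading NL, no trailing NL, and no two adjacent NL tokens.
import Mathlib
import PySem

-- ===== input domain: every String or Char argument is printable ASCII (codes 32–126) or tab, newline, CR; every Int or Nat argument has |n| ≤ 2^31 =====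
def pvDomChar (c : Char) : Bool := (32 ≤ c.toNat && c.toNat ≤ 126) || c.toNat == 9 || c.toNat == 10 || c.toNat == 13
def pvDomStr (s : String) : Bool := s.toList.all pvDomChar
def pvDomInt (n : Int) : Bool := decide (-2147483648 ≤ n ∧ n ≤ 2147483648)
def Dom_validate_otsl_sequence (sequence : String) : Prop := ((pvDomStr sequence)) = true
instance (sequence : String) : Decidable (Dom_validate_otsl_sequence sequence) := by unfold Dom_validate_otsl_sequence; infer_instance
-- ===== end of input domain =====

-- B replaces A's current_row accumulator by local checks (no leading/trailing NL, no adjacent NL pair); objective: simpler.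

-- ===== PORT A =====
-- the for-loop over tokens with the current_row accumulator, plus the final empty-row check
def otslLoopA : List String → List String → Bool
  | [], currentRow => !currentRow.isEmpty      -- "if not current_row: return False / return True"
  | token :: rest, currentRow =>
      if token == "NL" then
        if currentRow.isEmpty then false
        else otslLoopA rest []
      else otslLoopA rest (currentRow ++ [token])

def validate_otsl_sequence (sequence : String) : Bool :=
  let tokens := PySem.Str.split₀ sequence
  if tokens.isEmpty then false
  else otslLoopA tokens []

-- ===== PORT B =====
-- "for a, b in zip(tokens, tokens[1:]): if a == 'NL' and b == 'NL': return False"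
def otslPairsB : List String → Bool
  | a :: b :: rest => if a == "NL" && b == "NL" then false else otslPairsB (b :: rest)
  | _ => true

def validate_otsl_sequence_alt (sequence : String) : Bool :=
  let tokens := PySem.Str.split₀ sequence
  match tokens with
  | [] => false
  | t :: ts =>
      if t == "NL" || (t :: ts).getLastD "" == "NL" then false
      else otslPairsB (t :: ts)

-- ===== PRECONDITION & SPEC =====
def Spec_validate_otsl_sequence (sequence : String) (out : Bool) : Prop := out = validate_otsl_sequence_alt sequence
instance (sequence : String) (out : Bool) : Decidable (Spec_validate_otsl_sequence sequence out) := by unfold Spec_validate_otsl_sequence; infer_instance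

-- ===== CLAIM (what is proved, stated in full; the proofs are below) =====
def Claim_equal_validate_otsl_sequence : Prop := ∀ (sequence : String), Dom_validate_otsl_sequence sequence → Spec_validate_otsl_sequence sequence (validate_otsl_sequence sequence)

-- ===== LEMMAS AND PROOFS =====

-- loopB: A's loop with the accumulator abstracted to "current row is non-empty"
def otslLoopB : List String → Bool → Bool
  | [], b => b
  | token :: rest, b =>
      if token == "NL" then (if b then otslLoopB rest false else false)
      else otslLoopB rest true

lemma otslLoopA_eq_loopB (l : List String) (cur : List String) :
    otslLoopA l cur = otslLoopB l (!cur.isEmpty) := by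
  induction l generalizing cur with
  | nil => simp [otslLoopA, otslLoopB]
  | cons t ts ih =>
      by_cases h : t == "NL" <;>
        simp [otslLoopA, otslLoopB, h, ih, List.isEmpty_iff] <;>
        cases cur <;> simp_all

-- g l: the whole-list condition B checks after a non-NL first token
def otslG (l : List String) : Bool := otslPairsB l && !(l.getLastD "" == "NL")

lemma otslLoopB_char (l : List String) :
    otslLoopB l true = otslG l ∧
    otslLoopB l false = (match l with
      | [] => false
      | u :: us => if u == "NL" then false else otslG (u :: us)) := by
  induction l with
  | nil => simp [otslLoopB, otslG, otslPairsB]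
  | cons t ts ih =>
      obtain ⟨ih1, ih2⟩ := ih
      constructor
      · by_cases h : t == "NL"
        · rw [otslLoopB]; simp only [h, if_true]
          rw [ih2]
          cases ts with
          | nil => simp [otslG, otslPairsB, h]
          | cons u us =>
              by_cases hu : u == "NL" <;>
                simp [otslG, otslPairsB, h, hu]
        · rw [otslLoopB]; simp only [if_neg (by simpa using h)]
          rw [ih1]
          cases ts with
          | nil => simp [otslG, otslPairsB, h]
          | cons u us => simp [otslG, otslPairsB, h]
      · by_cases h : t == "NL"
        · simp [otslLoopB, h]
        · rw [otslLoopB]; simp only [if_neg (by simpa using h)]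
          rw [ih1]
          cases ts with
          | nil => simp [otslG, otslPairsB, h]
          | cons u us => simp [otslG, otslPairsB, h]

-- ===== VERDICT (by name: the statement is the Claim_ definition above) =====
theorem validate_otsl_sequence_spec : Claim_equal_validate_otsl_sequence := by
  intro s _
  unfold Spec_validate_otsl_sequence validate_otsl_sequence validate_otsl_sequence_alt
  cases hl : PySem.Str.split₀ s with
  | nil => simp
  | cons t ts =>
      simp only [List.isEmpty_cons, Bool.false_eq_true, if_false]
      rw [otslLoopA_eq_loopB]
      simp only [List.isEmpty_nil, Bool.not_true]
      rw [(otslLoopB_char (t :: ts)).2]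
      by_cases h : t == "NL"
      · simp [h]
      · cases h2 : ((t :: ts).getLastD "" == "NL") <;> simp_all [otslG]
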